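-- pv_equiv track=rewrite | github.com/aws-samples/aws-serverless-realtime-aggregation | Common/functions.py | aggregate_along_tree
-- ===== SOURCE A (Python) =====
-- def dict_entry_add(dictionary, key, value):
--     if key in dictionary:
--         dictionary[key] += value
--     else:
--         dictionary[key] = value
--
-- def aggregate_along_tree(data):
--
--     # Determine aggregation depth
--     aggregation_depth = max([key.count(':') for key in data.keys()])
--
--     # Start at max depth and go higher
--     for depth in range(aggregation_depth, 0, -1):
--         children = [key for key in data.keys() if key.count(':') == depth]
--         for child in children:
--             parent = child[:child.rfind(':')]
--             dict_entry_add(data, parent, data[child])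
--
--     return data
-- ===== SOURCE B (Python) =====
-- def aggregate_along_tree(data):
--     # Bucket keys by depth once; each pass reads its bucket and appends new
--     # parents to the bucket one level up -- no per-depth rescan of all keys.
--     # Mutates `data` in place and returns it, like the original.
--     buckets = {}
--     for key in data:
--         buckets.setdefault(key.count(':'), []).append(key)
--
--     for depth in range(max(buckets), 0, -1):
--         for child in buckets.get(depth, []):
--             parent = child[:child.rfind(':')]
--             if parent in data:
--                 data[parent] += data[child]
--             else:
--                 data[parent] = data[child]
--                 buckets.setdefault(depth - 1, []).append(parent)
--     return data
-- ===== Notes on version B (the rewrite author's own statement) =====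
-- stated objective: alternative
-- what changed: keys are bucketed by colon-depth in a single pass and each depth pass reads its own bucket (appending newly created parents to the bucket one level up) instead of rescanning and re-counting every key of the dict at every depth
import Mathlib
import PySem

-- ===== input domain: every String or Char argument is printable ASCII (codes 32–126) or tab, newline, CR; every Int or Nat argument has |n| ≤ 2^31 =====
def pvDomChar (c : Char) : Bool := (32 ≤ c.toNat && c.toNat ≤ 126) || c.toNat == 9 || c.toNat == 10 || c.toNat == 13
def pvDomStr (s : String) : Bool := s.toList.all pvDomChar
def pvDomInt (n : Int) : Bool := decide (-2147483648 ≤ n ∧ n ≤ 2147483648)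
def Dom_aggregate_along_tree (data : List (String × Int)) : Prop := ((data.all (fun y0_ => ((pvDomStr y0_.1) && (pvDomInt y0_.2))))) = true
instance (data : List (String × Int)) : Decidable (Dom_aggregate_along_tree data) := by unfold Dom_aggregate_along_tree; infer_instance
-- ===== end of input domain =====

-- B buckets the keys by colon-depth once and lets each pass read its own bucket
-- (appending new parents to the bucket one level up) instead of rescanning every
-- key at every depth; both Pythons mutate the dict in place and return it, the
-- equivalence proved here is about the returned mapping.

-- ===== PORT A =====
-- shared sub-expressions of both Pythons: key.count(':') and child[:child.rfind(':')]
def pvCnt (key : String) : Int := (PySem.Str.count key ":" : Int)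
def pvParent (child : String) : String :=
  PySem.Str.slice child none (some (PySem.Str.rfind child ":"))

def dict_entry_add (dictionary : PySem.Dict String Int) (key : String) (value : Int) :
    PySem.Dict String Int :=
  if dictionary.contains key then dictionary.insert key (dictionary.getD key 0 + value)
  else dictionary.insert key value

-- body of A's inner loop; data[child] is read with getD: child is drawn from the keys,
-- so the default is never used and the read is exact
def pvStepA (d : PySem.Dict String Int) (child : String) : PySem.Dict String Int :=
  dict_entry_add d (pvParent child) (d.getD child 0)

-- one pass of A's outer loop: recompute the children at this depth, then fold
def pvPassA (d : PySem.Dict String Int) (depth : Int) : PySem.Dict String Int :=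
  ((d.keys.filter fun k => pvCnt k == depth).foldl pvStepA d)

def aggregate_along_tree (data : List (String × Int)) : List (String × Int) :=
  let d0 := PySem.Dict.mk data
  match PySem.List.max? (d0.keys.map pvCnt) (fun x => x) with
  | none => data   -- Python: max([]) raises ValueError on the empty dict; excluded by Pre_
  | some aggregation_depth =>
      ((PySem.List.pyRange aggregation_depth 0 (-1)).foldl pvPassA d0).items

-- ===== PORT B =====
-- body of B's inner loop: state = (the dict, the depth buckets)
def pvStepB (depth : Int) (st : PySem.Dict String Int × PySem.Dict Int (List String))
    (child : String) : PySem.Dict String Int × PySem.Dict Int (List String) :=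
  let parent := pvParent child
  let v := st.1.getD child 0
  if st.1.contains parent then (st.1.insert parent (st.1.getD parent 0 + v), st.2)
  else (st.1.insert parent v, st.2.modify (depth - 1) [] (fun xs => xs ++ [parent]))

-- one pass of B's outer loop: read this depth's bucket, fold
def pvPassB (st : PySem.Dict String Int × PySem.Dict Int (List String)) (depth : Int) :
    PySem.Dict String Int × PySem.Dict Int (List String) :=
  (st.2.getD depth []).foldl (pvStepB depth) st

def aggregate_along_tree_alt (data : List (String × Int)) : List (String × Int) :=
  let buckets := data.foldl
    (fun b p => b.modify (pvCnt p.1) [] (fun xs => xs ++ [p.1])) PySem.Dict.empty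
  match PySem.List.max? buckets.keys (fun x => x) with
  | none => data   -- Python: max({}) raises ValueError on the empty dict; excluded by Pre_
  | some max_depth =>
      (((PySem.List.pyRange max_depth 0 (-1)).foldl pvPassB (PySem.Dict.mk data, buckets)).1).items

-- ===== PRECONDITION & SPEC =====
-- Pre_ excludes only the empty dict, on which the Python A raises ValueError (max of an empty sequence).
def Pre_aggregate_along_tree (data : List (String × Int)) : Prop := data ≠ []
instance (data : List (String × Int)) : Decidable (Pre_aggregate_along_tree data) := by
  unfold Pre_aggregate_along_tree; infer_instance

def pvWitness_aggregate_along_tree : (List (String × Int)) := [("a:b", 1), ("a", 2)]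

def Spec_aggregate_along_tree (data : List (String × Int)) (out : List (String × Int)) : Prop :=
  out = aggregate_along_tree_alt data
instance (data : List (String × Int)) (out : List (String × Int)) :
    Decidable (Spec_aggregate_along_tree data out) := by
  unfold Spec_aggregate_along_tree; infer_instance

-- ===== CLAIM (what is proved, stated in full; the proofs are below) =====
def Claim_equal_aggregate_along_tree : Prop := ∀ (data : List (String × Int)),
  Dom_aggregate_along_tree data → Pre_aggregate_along_tree data →
  Spec_aggregate_along_tree data (aggregate_along_tree data)

-- ===== LEMMAS AND PROOFS =====

-- (1) `s.count(c)` for a single character is List.count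
theorem pv_count_go_nil (c : Char) (fuel acc : Nat) :
    PySem.Chars.count.go [c] (fuel+1) [] acc = acc := by
  rw [PySem.Chars.count.go]; omega

theorem pv_count_go_cons (c h : Char) (t : List Char) (fuel acc : Nat) :
    PySem.Chars.count.go [c] (fuel+1) (h::t) acc =
      if c = h then PySem.Chars.count.go [c] fuel t (acc+1)
      else PySem.Chars.count.go [c] fuel t acc := by
  rw [PySem.Chars.count.go]
  by_cases hch : c = h <;> simp [List.isPrefixOf, hch]

theorem pv_count_go_spec (c : Char) : ∀ (fuel : Nat) (s : List Char), s.length ≤ fuel →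
    ∀ (acc : Nat), PySem.Chars.count.go [c] fuel s acc = acc + s.count c := by
  intro fuel
  induction fuel with
  | zero =>
    intro s hs acc
    rw [List.length_eq_zero_iff.mp (Nat.le_zero.mp hs)]
    rw [PySem.Chars.count.go]; simp
  | succ n ih =>
    intro s hs acc
    cases s with
    | nil => simp [pv_count_go_nil]
    | cons h t =>
      rw [pv_count_go_cons]
      simp at hs
      by_cases hch : c = h
      · rw [if_pos hch, ih t (by omega)]; subst hch; simp; omega
      · rw [if_neg hch, ih t (by omega)]; simp [Ne.symm hch]

theorem pv_chars_count_singleton (c : Char) (s : List Char) :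
    PySem.Chars.count s [c] = s.count c := by
  unfold PySem.Chars.count
  simp [pv_count_go_spec c s.length s (le_refl _) 0]

theorem pvCnt_eq (k : String) : pvCnt k = (k.toList.count ':' : Int) := by
  unfold pvCnt
  rw [PySem.Str.count_eq]
  have h : (":" : String).toList = [':'] := by decide
  rw [h, pv_chars_count_singleton]

-- (2) rfind for a single character finds the last occurrence
theorem pv_rfind_go_succ (s sub : List Char) (j : Nat) :
    PySem.Chars.rfind.go s sub (j+1) =
      if sub.isPrefixOf (s.drop (j+1)) then ((j+1 : Nat) : Int)
      else PySem.Chars.rfind.go s sub j := by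
  rw [PySem.Chars.rfind.go]

theorem pv_rfind_go_zero (s sub : List Char) :
    PySem.Chars.rfind.go s sub 0 = if sub.isPrefixOf s then 0 else -1 := by
  rw [PySem.Chars.rfind.go]

theorem pv_rfind_go_skip (l r : List Char) (c : Char) (hr : c ∉ r) :
    ∀ (k : Nat), PySem.Chars.rfind.go (l ++ c :: r) [c] (l.length + k) = (l.length : Int) := by
  intro k
  induction k with
  | zero =>
    cases hl : l.length with
    | zero =>
      rw [List.length_eq_zero_iff.mp hl] at *
      simp [pv_rfind_go_zero, List.isPrefixOf]
    | succ m =>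
      simp only [Nat.add_zero]
      rw [pv_rfind_go_succ]
      have hd : (l ++ c :: r).drop (m+1) = c :: r := by
        rw [← hl]; exact List.drop_left
      rw [hd]
      simp [List.isPrefixOf]
  | succ k ih =>
    have h1 : l.length + (k+1) = (l.length + k) + 1 := by omega
    rw [h1, pv_rfind_go_succ]
    have hd : (l ++ c :: r).drop (l.length + k + 1) = r.drop k := by
      rw [List.drop_append]
      have h3 : l.drop (l.length + k + 1) = [] := List.drop_eq_nil_of_le (by omega)
      have h4 : l.length + k + 1 - l.length = k + 1 := by omega
      rw [h3, h4, List.nil_append, List.drop_succ_cons]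
    rw [hd]
    have hnp : ([c].isPrefixOf (r.drop k)) = false := by
      cases hdr : r.drop k with
      | nil => simp [List.isPrefixOf]
      | cons a t =>
        simp only [List.isPrefixOf, Bool.and_true, beq_eq_false_iff_ne, ne_eq]
        intro hca
        apply hr
        have ha : a ∈ r.drop k := by rw [hdr]; exact List.mem_cons_self
        exact hca ▸ List.mem_of_mem_drop ha
    rw [hnp]
    simp only [Bool.false_eq_true, if_false]
    exact ih

theorem pv_rfind_last (l r : List Char) (c : Char) (hr : c ∉ r) :
    PySem.Chars.rfind (l ++ c :: r) [c] = (l.length : Int) := by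
  unfold PySem.Chars.rfind
  have h : (l ++ c :: r).length = l.length + (r.length + 1) := by simp
  rw [h]
  exact pv_rfind_go_skip l r c hr (r.length + 1)

theorem pv_last_split {c : Char} : ∀ {s : List Char}, c ∈ s → ∃ l r, s = l ++ c :: r ∧ c ∉ r := by
  intro s
  induction s with
  | nil => intro h; cases h
  | cons a t ih =>
    intro h
    by_cases hct : c ∈ t
    · obtain ⟨l, r, h1, h2⟩ := ih hct
      exact ⟨a :: l, r, by rw [h1]; rfl, h2⟩
    · have hac : a = c := by
        cases List.mem_cons.mp h with
        | inl h' => exact h'.symm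
        | inr h' => exact absurd h' hct
      exact ⟨[], t, by simp [hac], hct⟩

-- (3) chopping at the last ':' lowers the colon count by exactly one
theorem pv_parent_cnt (s : String) (h : 1 ≤ pvCnt s) : pvCnt (pvParent s) = pvCnt s - 1 := by
  have hmem : ':' ∈ s.toList := by
    rw [pvCnt_eq] at h
    exact List.count_pos_iff.mp (by exact_mod_cast h)
  obtain ⟨l, r, hs, hr⟩ := pv_last_split hmem
  have hcolon : (":" : String).toList = [':'] := by decide
  have hrf : PySem.Str.rfind s ":" = (l.length : Int) := by
    rw [PySem.Str.rfind_eq, hcolon, hs]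
    exact pv_rfind_last l r ':' hr
  have hpl : (pvParent s).toList = l := by
    unfold pvParent
    rw [hrf, PySem.Str.toList_slice, PySem.Chars.slice_eq_listSlice,
      PySem.List.slice_to s.toList (by positivity), hs]
    simp
  rw [pvCnt_eq, pvCnt_eq, hpl, hs]
  have hr0 : r.count ':' = 0 := List.count_eq_zero.mpr hr
  simp [List.count_append, hr0]

-- (4) the dict/bucket invariant: the keys at each depth are exactly that depth's bucket
def pvINV (agg : PySem.Dict String Int) (b : PySem.Dict Int (List String)) : Prop :=
  ∀ i : Int, agg.keys.filter (fun k => pvCnt k == i) = b.getD i []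

theorem pv_inner (depth : Int) (hdep : 1 ≤ depth) :
    ∀ (cs : List String) (agg : PySem.Dict String Int) (b : PySem.Dict Int (List String)),
    (∀ c ∈ cs, pvCnt c = depth) → pvINV agg b →
    (cs.foldl (pvStepB depth) (agg, b)).1 = cs.foldl pvStepA agg ∧
    pvINV (cs.foldl pvStepA agg) (cs.foldl (pvStepB depth) (agg, b)).2 := by
  intro cs
  induction cs with
  | nil => intro agg b _ hinv; exact ⟨rfl, hinv⟩
  | cons c cs ih =>
    intro agg b hcs hinv
    have hc : pvCnt c = depth := hcs c List.mem_cons_self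
    have hpc : pvCnt (pvParent c) = depth - 1 := by
      rw [pv_parent_cnt c (by omega)]; omega
    have hstep : pvStepB depth (agg, b) c =
        (pvStepA agg c, (pvStepB depth (agg, b) c).2) ∧
        pvINV (pvStepA agg c) ((pvStepB depth (agg, b) c).2) := by
      unfold pvStepA dict_entry_add pvStepB
      by_cases hcont : agg.contains (pvParent c)
      · simp only [hcont, if_true]
        refine ⟨trivial, ?_⟩
        intro i
        rw [PySem.Dict.keys_insert_of_contains agg _ hcont]
        exact hinv i
      · simp only [hcont, Bool.false_eq_true, if_false]
        refine ⟨trivial, ?_⟩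
        intro i
        rw [PySem.Dict.keys_insert_of_not_contains agg _ (by simpa using hcont)]
        rw [List.filter_append, PySem.Dict.getD_modify]
        by_cases hi : i = depth - 1
        · subst hi
          rw [if_pos rfl, ← hinv (depth - 1)]
          simp [hpc]
        · rw [if_neg hi, ← hinv i]
          simp only [List.filter_cons, List.filter_nil, hpc]
          have : ((depth - 1 : Int) == i) = false := by
            simp [Ne.symm hi]
          rw [this]
          simp
    obtain ⟨hpair, hinv'⟩ := hstep
    simp only [List.foldl_cons]
    rw [hpair]
    exact ih (pvStepA agg c) _ (fun x hx => hcs x (List.mem_cons_of_mem c hx)) hinv'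

theorem pv_outer : ∀ (n : Nat) (agg : PySem.Dict String Int) (b : PySem.Dict Int (List String)),
    pvINV agg b →
    ((PySem.List.pyRange (n : Int) 0 (-1)).foldl pvPassB (agg, b)).1 =
      (PySem.List.pyRange (n : Int) 0 (-1)).foldl pvPassA agg := by
  intro n
  induction n with
  | zero =>
    intro agg b _
    rw [PySem.List.pyRange_neg_one_eq_nil (by norm_num)]
    rfl
  | succ n ih =>
    intro agg b hinv
    have hpos : (0 : Int) < ((n+1 : Nat) : Int) := by omega
    rw [PySem.List.pyRange_neg_one_cons hpos]
    have hcast : ((n+1 : Nat) : Int) - 1 = (n : Int) := by push_cast; ring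
    simp only [List.foldl_cons, hcast]
    have hch : agg.keys.filter (fun k => pvCnt k == ((n+1 : Nat) : Int)) =
        b.getD ((n+1 : Nat) : Int) [] := hinv _
    have hmem : ∀ c ∈ agg.keys.filter (fun k => pvCnt k == ((n+1 : Nat) : Int)),
        pvCnt c = ((n+1 : Nat) : Int) := by
      intro c hcf
      have := (List.mem_filter.mp hcf).2
      exact eq_of_beq (by simpa using this)
    obtain ⟨heq, hinv'⟩ :=
      pv_inner ((n+1 : Nat) : Int) (by omega) _ agg b hmem hinv
    have hpassB : pvPassB (agg, b) ((n+1 : Nat) : Int) =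
        (pvPassA agg ((n+1 : Nat) : Int),
         ((agg.keys.filter (fun k => pvCnt k == ((n+1 : Nat) : Int))).foldl
            (pvStepB ((n+1 : Nat) : Int)) (agg, b)).2) := by
      unfold pvPassB pvPassA
      rw [← hch]
      exact Prod.ext heq rfl
    rw [hpassB]
    exact ih _ _ (by unfold pvPassA; exact hinv')

-- (5) initial state: B's buckets list exactly the keys of each depth, in order
theorem pv_buckets_getD (data : List (String × Int)) (i : Int) :
    (data.foldl (fun b p => b.modify (pvCnt p.1) [] (fun xs => xs ++ [p.1]))
        (PySem.Dict.empty : PySem.Dict Int (List String))).getD i [] =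
      (data.map (·.1)).filter (fun k => pvCnt k == i) := by
  have hfold : data.foldl (fun b p => b.modify (pvCnt p.1) [] (fun xs => xs ++ [p.1]))
      (PySem.Dict.empty : PySem.Dict Int (List String)) =
      (data.map (fun p => (pvCnt p.1, p.1))).foldl
        (fun d q => d.modify q.1 [] (fun xs => xs ++ [q.2])) PySem.Dict.empty := by
    rw [List.foldl_map]
  rw [hfold, PySem.Dict.getD_foldl_modify_append]
  simp only [PySem.Dict.getD_empty, List.nil_append]
  rw [List.filter_map, List.filter_map]
  simp [Function.comp_def]

theorem pv_init_inv (data : List (String × Int)) :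
    pvINV (PySem.Dict.mk data)
      (data.foldl (fun b p => b.modify (pvCnt p.1) [] (fun xs => xs ++ [p.1]))
        (PySem.Dict.empty : PySem.Dict Int (List String))) := by
  intro i
  rw [pv_buckets_getD]
  simp [PySem.Dict.keys]

-- (6) both versions compute the same maximum depth
theorem pv_max_ofList (xs : List Int) :
    PySem.List.max? (PySem.Set.ofList xs) (fun x => x) = PySem.List.max? xs (fun x => x) := by
  cases hx : PySem.List.max? xs (fun x => x) with
  | none =>
    rw [(PySem.List.max?_eq_none_iff xs _).mp hx]
    simp [PySem.Set.ofList_nil]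
  | some m =>
    cases hy : PySem.List.max? (PySem.Set.ofList xs) (fun x => x) with
    | none =>
      have hxs : PySem.Set.ofList xs = [] := (PySem.List.max?_eq_none_iff _ _).mp hy
      have hm : m ∈ xs := PySem.List.max?_mem hx
      have hmm : m ∈ PySem.Set.ofList xs := (PySem.Set.mem_ofList _ _).mpr hm
      rw [hxs] at hmm
      cases hmm
    | some m' =>
      have h1 : m' ≤ m := PySem.List.max?_isMax hx m' ((PySem.Set.mem_ofList _ _).mp (PySem.List.max?_mem hy))
      have h2 : m ≤ m' := PySem.List.max?_isMax hy m ((PySem.Set.mem_ofList _ _).mpr (PySem.List.max?_mem hx))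
      rw [le_antisymm h1 h2]

theorem pv_buckets_keys (data : List (String × Int)) :
    (data.foldl (fun b p => b.modify (pvCnt p.1) [] (fun xs => xs ++ [p.1]))
        (PySem.Dict.empty : PySem.Dict Int (List String))).keys =
      PySem.Set.ofList (data.map (fun p => pvCnt p.1)) := by
  rw [PySem.Dict.keys_foldl_modify_key data (fun p => pvCnt p.1) []
    (fun _ p => fun xs => xs ++ [p.1]) PySem.Dict.empty]
  rw [PySem.Dict.keys_empty, PySem.Set.update_nil_left]

-- ===== VERDICT (by name: the statement is the Claim_ definition above) =====
theorem aggregate_along_tree_spec : Claim_equal_aggregate_along_tree := by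
  unfold Claim_equal_aggregate_along_tree
  intro data _ _
  unfold Spec_aggregate_along_tree
  simp only [aggregate_along_tree, aggregate_along_tree_alt]
  rw [pv_buckets_keys, pv_max_ofList]
  have hlist : (PySem.Dict.mk data).keys.map pvCnt = data.map (fun p => pvCnt p.1) := by
    simp [PySem.Dict.keys]
  rw [hlist]
  cases hmax : PySem.List.max? (data.map (fun p => pvCnt p.1)) (fun x => x) with
  | none => rfl
  | some D =>
    have hD0 : 0 ≤ D := by
      have hmem := PySem.List.max?_mem hmax
      obtain ⟨p, _, hp⟩ := List.mem_map.mp hmem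
      rw [← hp]
      unfold pvCnt
      positivity
    obtain ⟨n, hn⟩ : ∃ n : Nat, D = (n : Int) := ⟨D.toNat, (Int.toNat_of_nonneg hD0).symm⟩
    subst hn
    have hfin := pv_outer n (PySem.Dict.mk data) _ (pv_init_inv data)
    simp only [hfin]
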